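-- pv_equiv track=rewrite | github.com/fdev/sciibo | sciibo/bot/ai.py | best_moves
-- ===== SOURCE A (Python) =====
-- def best_moves(result):
--     """
--     For each list of moves, count the number of hand cards and the
--     number of SB cards that are played, and return the set of
--     moves with minimum SB cards and maximum hand cards.
--     """
--     result = [
--         (
--             sum(1 for value, source, target in moves if source == 'hand'),
--             sum(1 for value, source, target in moves if value == 'SB'),
--             moves
--         ) for moves in result
--     ]
--
--     # Get the least number of SB cards for moves that play the maximum number of hand cards
--     minsb = min(sb for hands, sb, moves in result)
--
--     # Get the maximum number of hand cards that can be played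
--     maxhands = max(hands for hands, sb, moves in result if sb == minsb)
--
--     # Return first set of moves with maximum hand cards and minimum SB cards
--     for hands, sb, moves in result:
--         if hands == maxhands and sb == minsb:
--             return moves
-- ===== SOURCE B (Python) =====
-- def best_moves(result):
--     """Single-pass fold: keep the first moves whose (sb, -hands) key is
--     lexicographically smallest."""
--     best = result[0]
--     best_hands = sum(1 for value, source, target in best if source == 'hand')
--     best_sb = sum(1 for value, source, target in best if value == 'SB')
--     for moves in result[1:]:
--         hands = sum(1 for value, source, target in moves if source == 'hand')
--         sb = sum(1 for value, source, target in moves if value == 'SB')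
--         if sb < best_sb or (sb == best_sb and hands > best_hands):
--             best, best_sb, best_hands = moves, sb, hands
--     return best
-- ===== Notes on version B (the rewrite author's own statement) =====
-- stated objective: simpler
-- what changed: Replaces the intermediate (hands, sb, moves) tuple list plus three separate scans (min over SB counts, max over hand counts at that minimum, find-first of both) with one single-pass fold that threads the running best under the lexicographic key (sb, -hands), keeping the earlier element on ties.
import Mathlib
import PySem

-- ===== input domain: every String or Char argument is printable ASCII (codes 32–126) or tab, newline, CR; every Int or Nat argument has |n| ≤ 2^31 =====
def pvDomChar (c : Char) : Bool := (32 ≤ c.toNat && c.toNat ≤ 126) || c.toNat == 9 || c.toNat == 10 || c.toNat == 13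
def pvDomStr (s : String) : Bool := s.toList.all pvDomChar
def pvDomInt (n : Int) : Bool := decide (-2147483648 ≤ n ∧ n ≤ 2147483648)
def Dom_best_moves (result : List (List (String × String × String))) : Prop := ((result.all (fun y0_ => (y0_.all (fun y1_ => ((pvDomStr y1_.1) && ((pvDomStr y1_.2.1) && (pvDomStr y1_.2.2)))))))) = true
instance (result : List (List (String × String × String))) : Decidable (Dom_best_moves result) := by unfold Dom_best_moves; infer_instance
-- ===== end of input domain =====

-- B is a single-pass fold replacing A's tuple list + three scans; return values proved equal on nonempty input (both raise on []).

-- ===== PORT A =====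
-- sum(1 for value, source, target in moves if source == 'hand')
def handCount (moves : List (String × String × String)) : Int :=
  moves.foldl (fun n m => if m.2.1 == "hand" then n + 1 else n) 0

-- sum(1 for value, source, target in moves if value == 'SB')
def sbCount (moves : List (String × String × String)) : Int :=
  moves.foldl (fun n m => if m.1 == "SB" then n + 1 else n) 0

-- literal transliteration of A: tuple list, min, max over the filtered, find first.
-- min()/max() on empty raise ValueError (the `none` branches, excluded by Pre_);
-- the final `for` can fall through only on [] (Python would return None) — also the `none` branch.
def best_moves (result : List (List (String × String × String))) : List (String × String × String) :=
  let triples := result.map (fun moves => (handCount moves, sbCount moves, moves))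
  match PySem.List.min? (triples.map (fun t => t.2.1)) (fun x => x) with
  | none => []
  | some minsb =>
    match PySem.List.max? ((triples.filter (fun t => t.2.1 == minsb)).map (fun t => t.1)) (fun x => x) with
    | none => []
    | some maxhands =>
      match triples.find? (fun t => t.1 == maxhands && t.2.1 == minsb) with
      | some t => t.2.2
      | none => []

-- ===== PORT B =====
-- the loop body of Source B: improve the running (best, best_sb, best_hands)
def bStep (acc : List (String × String × String) × Int × Int)
    (moves : List (String × String × String)) : List (String × String × String) × Int × Int :=
  let hands := handCount moves
  let sb := sbCount moves
  if sb < acc.2.1 || (sb == acc.2.1 && hands > acc.2.2) then (moves, sb, hands) else acc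

-- literal transliteration of Source B (result[0] on [] raises IndexError: the [] branch, excluded by Pre_)
def best_moves_alt (result : List (List (String × String × String))) : List (String × String × String) :=
  match result with
  | [] => []
  | best :: rest => (rest.foldl bStep (best, sbCount best, handCount best)).1

-- ===== PRECONDITION & SPEC =====
-- A raises ValueError on the empty list (min() of an empty sequence); B raises IndexError there.
def Pre_best_moves (result : List (List (String × String × String))) : Prop := result ≠ []
instance (result : List (List (String × String × String))) : Decidable (Pre_best_moves result) := by
  unfold Pre_best_moves; infer_instance

def pvWitness_best_moves : (List (List (String × String × String))) := [[("SB", "hand", "p1")]]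

def Spec_best_moves (result : List (List (String × String × String))) (out : List (String × String × String)) : Prop := out = best_moves_alt result
instance (result : List (List (String × String × String))) (out : List (String × String × String)) : Decidable (Spec_best_moves result out) := by unfold Spec_best_moves; infer_instance

-- ===== CLAIM (what is proved, stated in full; the proofs are below) =====
def Claim_equal_best_moves : Prop := ∀ (result : List (List (String × String × String))), Dom_best_moves result → Pre_best_moves result → Spec_best_moves result (best_moves result)

-- ===== LEMMAS AND PROOFS =====

-- the lexicographic key both programs minimize, and its strict order
def pvKey (m : List (String × String × String)) : Int × Int := (sbCount m, -handCount m)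
def pvLt (a b : Int × Int) : Bool := a.1 < b.1 || (a.1 == b.1 && a.2 < b.2)
def pvLe (a b : Int × Int) : Prop := a.1 < b.1 ∨ (a.1 = b.1 ∧ a.2 ≤ b.2)
def pvMin2 (a b : Int × Int) : Int × Int := if pvLt b a then b else a
def pvStep (m x : List (String × String × String)) : List (String × String × String) :=
  if pvLt (pvKey x) (pvKey m) then x else m
def pvM (m : List (String × String × String)) (xs : List (List (String × String × String))) : Int × Int :=
  xs.foldl (fun a x => pvMin2 a (pvKey x)) (pvKey m)

theorem pvLe_refl (a : Int × Int) : pvLe a a := by unfold pvLe; omega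

theorem pvKey_step (m x : List (String × String × String)) :
    pvKey (pvStep m x) = pvMin2 (pvKey m) (pvKey x) := by
  unfold pvStep pvMin2; split_ifs <;> rfl

theorem pvM_cons (m x : List (String × String × String)) (xs : List (List (String × String × String))) :
    pvM m (x :: xs) = pvM (pvStep m x) xs := by
  unfold pvM
  simp [List.foldl_cons, pvKey_step]

theorem pvM_lb (xs : List (List (String × String × String))) (m : List (String × String × String)) :
    pvLe (pvM m xs) (pvKey m) ∧ ∀ x ∈ xs, pvLe (pvM m xs) (pvKey x) := by
  induction xs generalizing m with
  | nil => exact ⟨pvLe_refl _, by simp⟩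
  | cons y ys ih =>
    have h := ih (pvStep m y)
    rw [pvM_cons]
    constructor
    · -- pvLe (pvM (pvStep m y) ys) (pvKey m)
      have h1 := h.1
      rw [pvKey_step] at h1
      unfold pvMin2 at h1
      unfold pvLt at h1
      split_ifs at h1 with hc
      · simp only [Bool.or_eq_true, decide_eq_true_eq, Bool.and_eq_true, beq_iff_eq] at hc
        unfold pvLe at h1 ⊢; omega
      · exact h1
    · intro x hx
      rcases List.mem_cons.mp hx with rfl | hx
      · have h1 := h.1
        rw [pvKey_step] at h1
        unfold pvMin2 at h1
        unfold pvLt at h1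
        split_ifs at h1 with hc
        · exact h1
        · simp only [Bool.or_eq_true, decide_eq_true_eq, Bool.and_eq_true, beq_iff_eq,
            not_or, not_and] at hc
          unfold pvLe at h1 ⊢
          rcases hc with ⟨hc1, hc2⟩
          rcases h1 with h1 | h1
          · omega
          · by_cases he : (pvKey x).1 = (pvKey m).1
            · right; constructor; omega; have := hc2 (by omega ▸ by omega); omega
            · left; omega
      · exact h.2 x hx

theorem pvM_mem (xs : List (List (String × String × String))) (m : List (String × String × String)) :
    pvM m xs = pvKey m ∨ ∃ x ∈ xs, pvM m xs = pvKey x := by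
  induction xs generalizing m with
  | nil => left; rfl
  | cons y ys ih =>
    rw [pvM_cons]
    rcases ih (pvStep m y) with h | ⟨x, hx, h⟩
    · rw [h, pvKey_step]
      unfold pvMin2; split_ifs
      · right; exact ⟨y, by simp, rfl⟩
      · left; rfl
    · right; exact ⟨x, by simp [hx], h⟩

-- the fold over pvStep returns the FIRST element of (m :: xs) whose key equals the minimum key pvM m xs
theorem pv_fold_find (xs : List (List (String × String × String))) (m : List (String × String × String)) :
    (m :: xs).find? (fun e => pvKey e == pvM m xs) = some (xs.foldl pvStep m) := by
  induction xs generalizing m with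
  | nil =>
    simp [pvM]
  | cons x xs ih =>
    rw [pvM_cons]
    have hIH := ih (pvStep m x)
    rw [List.foldl_cons]
    by_cases hlt : pvLt (pvKey x) (pvKey m) = true
    · -- pvStep m x = x : m cannot be the minimum, drop it
      have hstep : pvStep m x = x := by unfold pvStep; exact if_pos hlt
      rw [hstep] at hIH ⊢
      rw [List.find?_cons]
      have hM := (pvM_lb xs x).1
      have hne : (pvKey m == pvM x xs) = false := by
        simp only [beq_eq_false_iff_ne, ne_eq]
        intro hEq
        unfold pvLt at hlt
        simp only [Bool.or_eq_true, decide_eq_true_eq, Bool.and_eq_true, beq_iff_eq] at hlt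
        unfold pvLe at hM
        rw [← hEq] at hM
        omega
      rw [hne]
      exact hIH
    · -- pvStep m x = m : x cannot be the first minimum, drop it
      have hstep : pvStep m x = m := by unfold pvStep; exact if_neg hlt
      rw [hstep] at hIH ⊢
      rw [List.find?_cons] at hIH ⊢
      by_cases hm : (pvKey m == pvM m xs) = true
      · rw [hm] at hIH ⊢; exact hIH
      · rw [Bool.of_not_eq_true hm] at hIH ⊢
        rw [List.find?_cons]
        have hx : (pvKey x == pvM m xs) = false := by
          simp only [beq_eq_false_iff_ne, ne_eq]
          intro hEq
          have hM := (pvM_lb xs m).1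
          simp only [beq_iff_eq] at hm
          unfold pvLt at hlt
          simp only [Bool.or_eq_true, decide_eq_true_eq, Bool.and_eq_true, beq_iff_eq,
            not_or, not_and, not_lt] at hlt
          unfold pvLe at hM
          rw [← hEq] at hM
          apply hm
          rw [← hEq]
          exact Prod.ext (by omega) (by omega)
        rw [hx]
        exact hIH

-- the B-port fold carries (best, sb best, hands best); its first component is the pvStep fold
theorem pv_bfold (xs : List (List (String × String × String))) (m : List (String × String × String)) :
    xs.foldl bStep (m, sbCount m, handCount m) =
      (xs.foldl pvStep m, sbCount (xs.foldl pvStep m), handCount (xs.foldl pvStep m)) := by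
  induction xs generalizing m with
  | nil => rfl
  | cons x xs ih =>
    rw [List.foldl_cons, List.foldl_cons]
    have hstep : bStep (m, sbCount m, handCount m) x =
        (pvStep m x, sbCount (pvStep m x), handCount (pvStep m x)) := by
      unfold bStep pvStep
      split_ifs with h1
      · dsimp only
        have hc : (decide (sbCount x < sbCount m) ||
            (sbCount x == sbCount m && decide (handCount x > handCount m))) = true := by
          unfold pvLt pvKey at h1
          simp only [Bool.or_eq_true, Bool.and_eq_true, decide_eq_true_eq, beq_iff_eq] at h1 ⊢
          omega
        rw [hc]
        simp
      · dsimp only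
        have hc : (decide (sbCount x < sbCount m) ||
            (sbCount x == sbCount m && decide (handCount x > handCount m))) = false := by
          unfold pvLt pvKey at h1
          simp only [Bool.or_eq_true, Bool.and_eq_true, decide_eq_true_eq, beq_iff_eq,
            not_or, not_and, not_lt] at h1
          simp only [Bool.or_eq_false_iff, Bool.and_eq_false_iff, decide_eq_false_iff_not,
            beq_eq_false_iff_ne, ne_eq, not_lt]
          omega
        rw [hc]
        simp
    rw [hstep, ih]

theorem pv_find?_map {A B : Type} (f : A → B) (p : B → Bool) (l : List A) :
    (l.map f).find? p = (l.find? (fun a => p (f a))).map f := by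
  induction l with
  | nil => rfl
  | cons a l ih =>
    rw [List.map_cons, List.find?_cons, List.find?_cons]
    by_cases h : p (f a) = true
    · rw [h]; rfl
    · rw [Bool.of_not_eq_true h]; exact ih

theorem best_moves_spec : Claim_equal_best_moves := by
  intro result _hdom hpre
  unfold Spec_best_moves
  obtain ⟨m0, rest, rfl⟩ : ∃ m0 rest, result = m0 :: rest := by
    cases result with
    | nil => exact absurd rfl hpre
    | cons a l => exact ⟨a, l, rfl⟩
  have hB : best_moves_alt (m0 :: rest) = rest.foldl pvStep m0 := by
    show (rest.foldl bStep (m0, sbCount m0, handCount m0)).1 = _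
    rw [pv_bfold]
  rw [hB]
  have hmap1 : ((m0 :: rest).map (fun moves => (handCount moves, sbCount moves, moves))).map
      (fun t => t.2.1) = (m0 :: rest).map sbCount := by
    simp [List.map_map, Function.comp]
  unfold best_moves
  dsimp only
  cases hmin : PySem.List.min? (((m0 :: rest).map
      (fun moves => (handCount moves, sbCount moves, moves))).map (fun t => t.2.1)) (fun x => x) with
  | none =>
    rw [PySem.List.min?_eq_none_iff] at hmin
    rw [hmap1] at hmin
    simp at hmin
  | some minsb =>
    dsimp only
    have hminmem : ∃ e ∈ m0 :: rest, sbCount e = minsb := by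
      have h := PySem.List.min?_mem hmin
      rw [hmap1] at h
      obtain ⟨e, he, hee⟩ := List.mem_map.mp h
      exact ⟨e, he, hee⟩
    have hminlb : ∀ e ∈ m0 :: rest, minsb ≤ sbCount e := by
      intro e he
      have h := PySem.List.min?_isMin hmin (sbCount e)
      rw [hmap1] at h
      exact h (List.mem_map.mpr ⟨e, he, rfl⟩)
    have hmap2 : ((((m0 :: rest).map (fun moves => (handCount moves, sbCount moves, moves))).filter
        (fun t => t.2.1 == minsb)).map (fun t => t.1))
        = ((m0 :: rest).filter (fun e => sbCount e == minsb)).map handCount := by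
      rw [List.filter_map]
      simp [List.map_map, Function.comp_def]
    cases hmax : PySem.List.max? ((((m0 :: rest).map
        (fun moves => (handCount moves, sbCount moves, moves))).filter
        (fun t => t.2.1 == minsb)).map (fun t => t.1)) (fun x => x) with
    | none =>
      rw [PySem.List.max?_eq_none_iff] at hmax
      rw [hmap2] at hmax
      obtain ⟨e', he', hse'⟩ := hminmem
      simp only [List.map_eq_nil_iff, List.filter_eq_nil_iff] at hmax
      exact absurd (by simpa using hse') (hmax e' he')
    | some maxhands =>
      dsimp only
      have hmaxmem : ∃ e ∈ m0 :: rest, sbCount e = minsb ∧ handCount e = maxhands := by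
        have h := PySem.List.max?_mem hmax
        rw [hmap2] at h
        obtain ⟨e, he, hee⟩ := List.mem_map.mp h
        obtain ⟨he2, hp⟩ := List.mem_filter.mp he
        exact ⟨e, he2, by simpa using hp, hee⟩
      have hmaxub : ∀ e ∈ m0 :: rest, sbCount e = minsb → handCount e ≤ maxhands := by
        intro e he hse
        have h := PySem.List.max?_isMax hmax (handCount e)
        rw [hmap2] at h
        exact h (List.mem_map.mpr ⟨e, List.mem_filter.mpr ⟨he, by simpa using hse⟩, rfl⟩)
      -- the lexicographic minimum key equals (minsb, -maxhands)
      have hM : pvM m0 rest = (minsb, -maxhands) := by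
        obtain ⟨eM, heM, hkeM⟩ : ∃ e ∈ m0 :: rest, pvM m0 rest = pvKey e := by
          rcases pvM_mem rest m0 with h | ⟨x, hx, h⟩
          · exact ⟨m0, by simp, h⟩
          · exact ⟨x, by simp [hx], h⟩
        have hlb : ∀ e ∈ m0 :: rest, pvLe (pvM m0 rest) (pvKey e) := by
          intro e he
          rcases List.mem_cons.mp he with rfl | he
          · exact (pvM_lb rest e).1
          · exact (pvM_lb rest m0).2 e he
        obtain ⟨e', he', hse'⟩ := hminmem
        obtain ⟨e'', he'', hse'', hhe''⟩ := hmaxmem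
        have h1 : (pvM m0 rest).1 = minsb := by
          have ha : minsb ≤ (pvM m0 rest).1 := by
            rw [hkeM]
            exact hminlb eM heM
          have hb := hlb e' he'
          unfold pvLe at hb
          unfold pvKey at hb
          simp only at hb
          omega
        have h2 : (pvM m0 rest).2 = -maxhands := by
          have hseM : sbCount eM = minsb := by
            have hfst := congrArg Prod.fst hkeM
            unfold pvKey at hfst
            simp only at hfst
            omega
          have hhm := hmaxub eM heM hseM
          have hsnd : (pvM m0 rest).2 = -handCount eM := by
            have hsn := congrArg Prod.snd hkeM
            unfold pvKey at hsn
            simpa using hsn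
          have hb := hlb e'' he''
          unfold pvLe pvKey at hb
          simp only at hb
          omega
        exact Prod.ext h1 h2
      -- A's find? predicate coincides with the key-minimum predicate
      have hpred : (fun (e : List (String × String × String)) =>
          handCount e == maxhands && sbCount e == minsb)
          = (fun e => pvKey e == pvM m0 rest) := by
        funext e
        rw [Bool.eq_iff_iff]
        simp only [Bool.and_eq_true, beq_iff_eq, pvKey, hM, Prod.ext_iff]
        constructor
        · rintro ⟨ha, hb⟩; exact ⟨hb, by omega⟩
        · rintro ⟨ha, hb⟩; exact ⟨by omega, ha⟩
      have hfind : ((m0 :: rest).map (fun moves => (handCount moves, sbCount moves, moves))).find?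
          (fun t => t.1 == maxhands && t.2.1 == minsb)
          = some (handCount (rest.foldl pvStep m0), sbCount (rest.foldl pvStep m0),
              rest.foldl pvStep m0) := by
        rw [pv_find?_map]
        have : (fun (a : List (String × String × String)) =>
            handCount a == maxhands && sbCount a == minsb)
            = (fun e => pvKey e == pvM m0 rest) := hpred
        simp only [this]
        rw [pv_fold_find]
        rfl
      rw [hfind]
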